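-- pv_equiv track=rewrite | github.com/KhoiBui16/28Tech_Code_Online | Python/Source Code Python Contest/Contest_04_KyThuatDeQuy/Bai24_KiemTraMangTangDan.py | mang_tang_dan
-- ===== SOURCE A (Python) =====
-- def mang_tang_dan(arr, n):
--     if n == 1:
--         return True
--     else:
--         if arr[n - 1] <= arr[n - 2]:
--             return False
--         else:
--             return mang_tang_dan(arr, n - 1)
-- ===== SOURCE B (Python) =====
-- def mang_tang_dan(arr, n):
--     return all(arr[i - 1] < arr[i] for i in range(1, n))
-- ===== Notes on version B (the rewrite author's own statement) =====
-- stated objective: idiomatic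
-- what changed: Replaces the tail recursion counting n down with a single idiomatic forward pass all(arr[i-1] < arr[i] for i in range(1, n)).
-- outside the precondition, e.g. on mang_tang_dan([2, 1], 0): A returns False, B returns True; on mang_tang_dan([1, 2], 3): A raises IndexError, B raises IndexError
import Mathlib
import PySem

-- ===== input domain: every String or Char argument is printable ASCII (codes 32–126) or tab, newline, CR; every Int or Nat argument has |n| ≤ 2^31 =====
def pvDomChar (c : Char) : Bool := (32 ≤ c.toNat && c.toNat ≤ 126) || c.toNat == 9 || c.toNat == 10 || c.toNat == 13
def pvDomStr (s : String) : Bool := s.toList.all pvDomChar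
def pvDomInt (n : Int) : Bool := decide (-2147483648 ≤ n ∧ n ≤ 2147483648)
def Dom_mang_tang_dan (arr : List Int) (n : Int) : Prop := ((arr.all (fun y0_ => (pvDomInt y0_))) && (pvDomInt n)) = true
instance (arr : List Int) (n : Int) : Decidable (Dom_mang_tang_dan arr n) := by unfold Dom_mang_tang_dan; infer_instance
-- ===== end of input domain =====

-- B replaces A's tail recursion (counting n down) with one forward pass over range(1, n); same cost, more idiomatic.

-- ===== PORT A =====
-- A's recursion: n == 1 → True; else compare arr[n-1] with arr[n-2] (pyGet?; none = IndexError,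
-- excluded by Pre_) and recurse with n-1. Terminates because a successful (in-range) index keeps
-- n + len positive and decreasing.
def mang_tang_dan (arr : List Int) (n : Int) : Bool :=
  if n = 1 then true
  else
    match h1 : PySem.List.pyGet? arr (n - 1), PySem.List.pyGet? arr (n - 2) with
    | some a, some b =>
        if a ≤ b then false
        else mang_tang_dan arr (n - 1)
    | _, _ => false   -- IndexError in Python; these inputs are outside Pre_
termination_by (n + arr.length).toNat
decreasing_by
  have hin : PySem.Raise.InRange arr.length (n - 1) := by
    by_contra hc
    rw [← PySem.List.pyGet?_eq_none_iff (xs := arr)] at hc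
    simp [hc] at h1
  simp only [PySem.Raise.InRange] at hin
  omega

-- ===== PORT B =====
def mang_tang_dan_alt (arr : List Int) (n : Int) : Bool :=
  (PySem.List.pyRange 1 n 1).all fun i =>
    match PySem.List.pyGet? arr (i - 1) with
    | none => false   -- IndexError in Python; outside Pre_
    | some a =>
      match PySem.List.pyGet? arr i with
      | none => false   -- IndexError in Python; outside Pre_
      | some b => decide (a < b)

-- ===== PRECONDITION & SPEC =====
-- Pre_ excludes exactly the inputs outside A's natural domain 1 ≤ n ≤ len(arr) (n = 1 is fine for
-- any arr): for n > len(arr) A raises IndexError, and for n ≤ 0 A's negative-index wraparound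
-- either raises or returns an accidental value.
def Pre_mang_tang_dan (arr : List Int) (n : Int) : Prop :=
  n = 1 ∨ (1 ≤ n ∧ n ≤ arr.length)
instance (arr : List Int) (n : Int) : Decidable (Pre_mang_tang_dan arr n) := by
  unfold Pre_mang_tang_dan; infer_instance
def pvWitness_mang_tang_dan : List Int × Int := ([1, 2, 3], 3)

def Spec_mang_tang_dan (arr : List Int) (n : Int) (out : Bool) : Prop := out = mang_tang_dan_alt arr n
instance (arr : List Int) (n : Int) (out : Bool) : Decidable (Spec_mang_tang_dan arr n out) := by unfold Spec_mang_tang_dan; infer_instance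

-- ===== CLAIM (what is proved, stated in full; the proofs are below) =====
def Claim_equal_mang_tang_dan : Prop := ∀ (arr : List Int) (n : Int), Dom_mang_tang_dan arr n → Pre_mang_tang_dan arr n → Spec_mang_tang_dan arr n (mang_tang_dan arr n)

-- ===== LEMMAS AND PROOFS =====

theorem alt_one (arr : List Int) : mang_tang_dan_alt arr 1 = true := by
  simp [mang_tang_dan_alt, PySem.List.pyRange_one_eq_nil (by omega : (1:Int) ≤ 1)]

-- main induction: for n = k+1 with k+1 ≤ len, the two ports agree
theorem main_lemma (k : Nat) (arr : List Int) (hlen : (k : Int) + 1 ≤ arr.length) :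
    mang_tang_dan arr ((k : Int) + 1) = mang_tang_dan_alt arr ((k : Int) + 1) := by
  induction k with
  | zero => simp [mang_tang_dan, alt_one]
  | succ m ih =>
    have hm1 : m + 1 < arr.length := by exact_mod_cast by omega
    have hm : m < arr.length := by omega
    have hA : mang_tang_dan arr ((↑(m + 1) : Int) + 1)
        = if arr[m + 1] ≤ arr[m] then false else mang_tang_dan arr ((m : Int) + 1) := by
      rw [mang_tang_dan]
      have e1 : ((↑(m + 1) : Int) + 1) - 1 = ((m + 1 : Nat) : Int) := by push_cast; ring
      have e2 : ((↑(m + 1) : Int) + 1) - 2 = ((m : Nat) : Int) := by push_cast; ring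
      rw [e1, e2, PySem.List.pyGet?_ofNat (h := hm1), PySem.List.pyGet?_ofNat (h := hm)]
      have : (↑(m + 1) : Int) + 1 ≠ 1 := by push_cast; omega
      simp only [this, if_false]
      push_cast
      ring_nf
    have hB : mang_tang_dan_alt arr ((↑(m + 1) : Int) + 1)
        = (mang_tang_dan_alt arr ((m : Int) + 1) && decide (arr[m] < arr[m + 1])) := by
      unfold mang_tang_dan_alt
      have hsplit : PySem.List.pyRange 1 ((↑(m + 1) : Int) + 1) 1
          = PySem.List.pyRange 1 ((m : Int) + 1) 1 ++ [((m : Int) + 1)] := by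
        have := PySem.List.pyRange_one_succ_right (a := 1) (b := (m : Int) + 1) (by omega)
        simpa using this
      rw [hsplit, List.all_append]
      congr 1
      have e1 : ((m : Int) + 1) - 1 = ((m : Nat) : Int) := by ring
      have e2 : ((m + 1 : Nat) : Int) - 1 = ((m : Nat) : Int) := by push_cast; ring
      simp only [List.all_cons, List.all_nil, Bool.and_true,
        (by push_cast; ring : ((m : Int) + 1) = ((m + 1 : Nat) : Int)), e2,
        PySem.List.pyGet?_ofNat (h := hm),
        PySem.List.pyGet?_ofNat (h := hm1)]
    rw [hA, hB, ← ih (by push_cast at hlen ⊢; omega)]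
    by_cases hle : arr[m + 1] ≤ arr[m]
    · simp [hle, not_lt.mpr hle]
    · have hlt : arr[m] < arr[m + 1] := by omega
      simp [hle, hlt]

-- ===== VERDICT (by name: the statement is the Claim_ definition above) =====
theorem mang_tang_dan_spec : Claim_equal_mang_tang_dan := by
  intro arr n _ hpre
  unfold Spec_mang_tang_dan
  rcases hpre with h1 | ⟨hge, hle⟩
  · subst h1; rw [alt_one, mang_tang_dan]; simp
  · obtain ⟨k, hk⟩ : ∃ k : Nat, n = (k : Int) + 1 := ⟨(n - 1).toNat, by omega⟩
    subst hk
    exact main_lemma k arr hle
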